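-- pv_equiv track=rewrite | github.com/Elhadjamadousow/sow | main.py | liste
-- ===== SOURCE A (Python) =====
-- def liste(num = [2,4,7,8,2], nume = [1,3,9,4,6,7]):
--     liste = []
--     for i in num:
--         if i not in nume:
--             if i not in liste:
--                 liste.append(i)
--     for i in nume:
--         if i not in num:
--             if i not in liste:
--                 liste.append(i)
--     return liste
-- ===== SOURCE B (Python) =====
-- def liste(num = [2,4,7,8,2], nume = [1,3,9,4,6,7]):
--     def only_in(xs, other):
--         if not xs:
--             return []
--         head = xs[0]
--         rest = only_in(xs[1:], other)
--         if head in other: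
--             return rest
--         return [head] + [y for y in rest if y != head]
--     return only_in(num, nume) + only_in(nume, num)
-- ===== Notes on version B (the rewrite author's own statement) =====
-- stated objective: alternative
-- what changed: Replaces A's iterative loops that grow one shared result list under membership tests by a structural recursion per side that builds the answer back-to-front and deduplicates by filtering the head out of the recursive result, then concatenates the two independent parts.
import Mathlib
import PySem

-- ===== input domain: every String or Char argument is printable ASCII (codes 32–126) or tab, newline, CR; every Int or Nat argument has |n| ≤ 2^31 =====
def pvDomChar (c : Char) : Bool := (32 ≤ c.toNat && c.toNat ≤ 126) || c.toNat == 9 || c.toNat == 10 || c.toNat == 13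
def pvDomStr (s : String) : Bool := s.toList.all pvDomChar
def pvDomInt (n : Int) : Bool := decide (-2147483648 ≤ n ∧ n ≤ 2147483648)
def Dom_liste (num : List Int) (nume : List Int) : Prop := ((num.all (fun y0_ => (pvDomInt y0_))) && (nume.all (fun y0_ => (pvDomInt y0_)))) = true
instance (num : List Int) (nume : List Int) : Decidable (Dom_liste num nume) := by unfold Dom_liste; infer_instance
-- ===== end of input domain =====

-- B rebuilds each side's contribution by structural recursion (dedup by filtering the head
-- out of the recursive result) and concatenates the two parts (objective: alternative).

-- ===== PORT A =====
def liste (num : List Int) (nume : List Int) : List Int :=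
  -- liste = []; for i in num: if i not in nume: if i not in liste: liste.append(i)
  let l1 := num.foldl (fun acc i =>
    if i ∈ nume then acc else if i ∈ acc then acc else acc ++ [i]) []
  -- for i in nume: if i not in num: if i not in liste: liste.append(i)
  nume.foldl (fun acc i =>
    if i ∈ num then acc else if i ∈ acc then acc else acc ++ [i]) l1

-- ===== PORT B =====
-- def only_in(xs, other): recursion on xs, dedup by filtering head out of the recursive result
def pvOnlyIn (xs : List Int) (other : List Int) : List Int :=
  match xs with
  | [] => []
  | head :: tail =>
    let rest := pvOnlyIn tail other
    if head ∈ other then rest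
    else head :: rest.filter (fun y => y ≠ head)

def liste_alt (num : List Int) (nume : List Int) : List Int :=
  pvOnlyIn num nume ++ pvOnlyIn nume num

-- ===== PRECONDITION & SPEC =====
def Spec_liste (num : List Int) (nume : List Int) (out : List Int) : Prop := out = liste_alt num nume
instance (num : List Int) (nume : List Int) (out : List Int) : Decidable (Spec_liste num nume out) := by unfold Spec_liste; infer_instance

-- ===== CLAIM (what is proved, stated in full; the proofs are below) =====
def Claim_equal_liste : Prop := ∀ (num : List Int) (nume : List Int), Dom_liste num nume → Spec_liste num nume (liste num nume)

-- ===== LEMMAS AND PROOFS =====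

-- elements of pvOnlyIn xs other come from xs and are not in other
theorem pv_mem_onlyIn (xs other : List Int) (y : Int) (h : y ∈ pvOnlyIn xs other) :
    y ∈ xs ∧ y ∉ other := by
  induction xs with
  | nil => simp [pvOnlyIn] at h
  | cons head tail ih =>
    simp only [pvOnlyIn] at h
    by_cases ho : head ∈ other
    · simp only [if_pos ho] at h
      have := ih h
      exact ⟨List.mem_cons_of_mem _ this.1, this.2⟩
    · simp only [if_neg ho] at h
      rcases List.mem_cons.mp h with rfl | h
      · exact ⟨List.mem_cons_self, ho⟩
      · have := ih (List.mem_of_mem_filter h)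
        exact ⟨List.mem_cons_of_mem _ this.1, this.2⟩

-- A's loop started from acc equals acc ++ (B's recursive part, filtered to fresh elements)
theorem pv_fold_eq (other xs : List Int) (acc : List Int) :
    xs.foldl (fun acc i =>
      if i ∈ other then acc else if i ∈ acc then acc else acc ++ [i]) acc
    = acc ++ (pvOnlyIn xs other).filter (fun y => y ∉ acc) := by
  induction xs generalizing acc with
  | nil => simp [pvOnlyIn]
  | cons head tail ih =>
    simp only [List.foldl_cons, pvOnlyIn]
    by_cases ho : head ∈ other
    · simp only [if_pos ho, ih]
    · simp only [if_neg ho]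
      by_cases ha : head ∈ acc
      · simp only [if_pos ha, ih]
        congr 1
        rw [List.filter_cons, if_neg (by simp [ha]), List.filter_filter]
        symm
        apply List.filter_congr
        intro y _
        by_cases hy : y ∈ acc
        · simp [hy]
        · have : y ≠ head := fun e => hy (e ▸ ha)
          simp [hy, this]
      · simp only [if_neg ha, ih]
        rw [List.filter_cons, if_pos (by simp [ha]), List.filter_filter,
            List.append_assoc, List.singleton_append]
        congr 2
        apply List.filter_congr
        intro y _
        by_cases h1 : y = head <;> by_cases h2 : y ∈ acc <;> simp [h1, h2]

-- ===== VERDICT (by name: the statement is the Claim_ definition above) =====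
theorem liste_spec : Claim_equal_liste := by
  intro num nume _
  unfold Spec_liste liste liste_alt
  simp only []
  rw [pv_fold_eq, pv_fold_eq]
  simp only [List.nil_append]
  have h1 : (pvOnlyIn num nume).filter (fun y => y ∉ ([] : List Int)) = pvOnlyIn num nume := by
    simp
  rw [h1]
  congr 1
  rw [List.filter_eq_self]
  intro y hy
  have h2 := pv_mem_onlyIn nume num y hy
  have : y ∉ pvOnlyIn num nume := fun h => h2.2 (pv_mem_onlyIn num nume y h).1
  simpa using this
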